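-- pv_equiv track=rewrite | github.com/BlueTot/project_euler_solutions | special_problems/q101.py | final_diff
-- ===== SOURCE A (Python) =====
-- def final_diff(sequence): # function to get first final difference in the sequence (equal to n!*a where n = degree)
--     if len(sequence) == 1: # base case
--         return sequence[0]
--     else:
--         differences = []
--         for idx in range(1, len(sequence)):
--             differences.append(sequence[idx]-sequence[idx-1]) # calculate differences
--         return final_diff(differences)
-- ===== SOURCE B (Python) =====
-- def final_diff(sequence):
--     # Closed form: the (n-1)-th forward difference is the binomial-weighted
--     # signed sum  sum_k (-1)^(n-1-k) * C(n-1,k) * sequence[k],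
--     # with the binomial coefficient updated incrementally (O(n) total).
--     n = len(sequence)
--     total = 0
--     sign = -1 if (n - 1) % 2 else 1
--     c = 1
--     k = 0
--     for x in sequence:
--         total += sign * c * x
--         sign = -sign
--         c = c * (n - 1 - k) // (k + 1)
--         k += 1
--     return total
-- ===== Notes on version B (the rewrite author's own statement) =====
-- stated objective: faster
-- what changed: Replaces the O(n^2) recursive repeated-differencing with a single O(n) pass computing the binomial-weighted signed sum sum_k (-1)^(n-1-k)*C(n-1,k)*sequence[k], with the binomial coefficient updated incrementally.
-- crash fix: On the empty list A recurses forever on [] and raises RecursionError; B returns 0. — e.g. on final_diff([]): A raises RecursionError, B returns 0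
import Mathlib
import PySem

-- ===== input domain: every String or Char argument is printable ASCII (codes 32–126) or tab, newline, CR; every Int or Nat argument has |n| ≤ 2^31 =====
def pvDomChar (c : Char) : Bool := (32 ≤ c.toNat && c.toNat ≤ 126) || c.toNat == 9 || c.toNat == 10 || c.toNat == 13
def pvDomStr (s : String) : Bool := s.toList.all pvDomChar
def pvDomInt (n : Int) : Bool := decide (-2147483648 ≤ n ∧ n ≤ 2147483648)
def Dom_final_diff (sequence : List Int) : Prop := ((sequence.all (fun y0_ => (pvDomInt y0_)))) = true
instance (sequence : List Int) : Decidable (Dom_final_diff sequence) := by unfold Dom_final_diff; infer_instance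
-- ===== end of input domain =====

-- B replaces A's O(n^2) recursive repeated differencing by a single O(n) pass over the
-- list computing the binomial-weighted signed sum with incrementally updated coefficients.

-- ===== PORT A =====
-- generic shape of A's append-accumulating for-loop (cited by the termination lemma below)
theorem pv_foldl_append_map {α : Type} (l : List α) (g : α → Int) (init : List Int) :
    l.foldl (fun acc x => acc ++ [g x]) init = init ++ l.map g := by
  induction l generalizing init with
  | nil => simp
  | cons x l ih => simp [List.foldl_cons, ih]

-- A's inner for-loop building `differences`
def pvDiffsA (s : List Int) : List Int :=
  (PySem.List.pyRange 1 (s.length : Int) 1).foldl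
    (fun acc idx => acc ++ [PySem.List.pyGetD s idx 0 - PySem.List.pyGetD s (idx - 1) 0]) []

-- needed only for the port's termination (cited in decreasing_by)
theorem pvDiffsA_length_lt (s : List Int) (_h : ¬ s.length = 1) (h2 : ¬ s.length < 1) :
    (pvDiffsA s).length < s.length := by
  have hlen : (pvDiffsA s).length = ((s.length : Int) - 1).toNat := by
    unfold pvDiffsA
    rw [PySem.List.pyRange_one, List.foldl_map,
      pv_foldl_append_map _ (fun k : Nat => PySem.List.pyGetD s (1 + (k : Int)) 0 - PySem.List.pyGetD s (1 + (k : Int) - 1) 0)]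
    simp
  omega

def final_diff (sequence : List Int) : Int :=
  if sequence.length = 1 then PySem.List.pyGetD sequence 0 0
  else if sequence.length < 1 then 0  -- unreachable under Pre_: A recurses forever (RecursionError) on []
  else final_diff (pvDiffsA sequence)
termination_by sequence.length
decreasing_by exact pvDiffsA_length_lt sequence (by assumption) (by assumption)

-- ===== PORT B =====
def final_diff_alt (sequence : List Int) : Int :=
  let n : Int := sequence.length
  let sign0 : Int := if PySem.Int.mod (n - 1) 2 ≠ 0 then -1 else 1
  (sequence.foldl
    (fun (st : Int × Int × Int × Int) x =>
      (st.1 + st.2.1 * st.2.2.1 * x, -st.2.1,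
       PySem.Int.floordiv (st.2.2.1 * (n - 1 - st.2.2.2)) (st.2.2.2 + 1), st.2.2.2 + 1))
    (0, sign0, 1, 0)).1

-- ===== PRECONDITION & SPEC =====
-- Pre_ excludes only the empty list, on which A never returns (it recurses forever, RecursionError).
def Pre_final_diff (sequence : List Int) : Prop := sequence ≠ []
instance (sequence : List Int) : Decidable (Pre_final_diff sequence) := by unfold Pre_final_diff; infer_instance
def pvWitness_final_diff : List Int := ([1, 3, 7])

-- On the empty list A raises RecursionError (unbounded recursion); B returns 0.
def Raises_final_diff (sequence : List Int) : Prop := sequence = []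
instance (sequence : List Int) : Decidable (Raises_final_diff sequence) := by unfold Raises_final_diff; infer_instance
def pvRaiseWitness_final_diff : List Int := ([])
def pvRaiseWitnessOut_final_diff : Int := 0

def Spec_final_diff (sequence : List Int) (out : Int) : Prop := out = final_diff_alt sequence
instance (sequence : List Int) (out : Int) : Decidable (Spec_final_diff sequence out) := by unfold Spec_final_diff; infer_instance

-- ===== CLAIM (what is proved, stated in full; the proofs are below) =====
def Claim_equal_final_diff : Prop := ∀ (sequence : List Int), Dom_final_diff sequence → Pre_final_diff sequence → Spec_final_diff sequence (final_diff sequence)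
def Claim_raises_final_diff : Prop := (∀ (sequence : List Int), Dom_final_diff sequence → Raises_final_diff sequence → ¬ Pre_final_diff sequence) ∧ (Dom_final_diff (pvRaiseWitness_final_diff) ∧ Raises_final_diff (pvRaiseWitness_final_diff) ∧ final_diff_alt (pvRaiseWitness_final_diff) = pvRaiseWitnessOut_final_diff)

-- ===== LEMMAS AND PROOFS =====

-- the mathematical value both programs compute: the (n-1)-th forward difference
def pvF (s : List Int) : Int :=
  ∑ k ∈ Finset.range s.length,
    (-1 : Int) ^ (s.length - 1 - k) * (Nat.choose (s.length - 1) k : Int) * s.getD k 0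

theorem pvDiffsA_eq (s : List Int) :
    pvDiffsA s = (List.range (s.length - 1)).map (fun k => s.getD (k + 1) 0 - s.getD k 0) := by
  unfold pvDiffsA
  rw [PySem.List.pyRange_one, List.foldl_map,
    pv_foldl_append_map _ (fun k : Nat => PySem.List.pyGetD s (1 + (k : Int)) 0 - PySem.List.pyGetD s (1 + (k : Int) - 1) 0)]
  have hcast : ((s.length : Int) - 1).toNat = s.length - 1 := by omega
  rw [hcast, List.nil_append]
  apply List.map_congr_left
  intro k hk
  have hk' : k < s.length - 1 := List.mem_range.mp hk
  have h1 : PySem.List.pyGetD s (1 + (k : Int)) 0 = s.getD (k + 1) 0 := by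
    rw [PySem.List.pyGetD_of_nonneg s 0 (by omega)]
    congr 1; omega
  have h2 : PySem.List.pyGetD s (1 + (k : Int) - 1) 0 = s.getD k 0 := by
    rw [PySem.List.pyGetD_of_nonneg s 0 (by omega)]
    congr 1; omega
  rw [h1, h2]

-- Pascal-style identity: the binomial sum of adjacent differences is the next binomial sum
theorem pv_key (m : Nat) (f : Nat → Int) :
    ∑ k ∈ Finset.range (m + 1),
        (-1 : Int) ^ (m - k) * (Nat.choose m k : Int) * (f (k + 1) - f k)
      = ∑ k ∈ Finset.range (m + 2),
          (-1 : Int) ^ (m + 1 - k) * (Nat.choose (m + 1) k : Int) * f k := by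
  have hsplit : ∑ k ∈ Finset.range (m + 1),
      (-1 : Int) ^ (m - k) * (Nat.choose m k : Int) * (f (k + 1) - f k)
      = (∑ k ∈ Finset.range (m + 1), (-1 : Int) ^ (m - k) * (Nat.choose m k : Int) * f (k + 1))
        - ∑ k ∈ Finset.range (m + 1), (-1 : Int) ^ (m - k) * (Nat.choose m k : Int) * f k := by
    rw [← Finset.sum_sub_distrib]
    exact Finset.sum_congr rfl (fun k _ => by ring)
  have hR := Finset.sum_range_succ'
    (fun k => (-1 : Int) ^ (m + 1 - k) * (Nat.choose (m + 1) k : Int) * f k) (m + 1)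
  have hstep : ∀ k ∈ Finset.range (m + 1),
      (-1 : Int) ^ (m + 1 - (k + 1)) * (Nat.choose (m + 1) (k + 1) : Int) * f (k + 1)
        = (-1 : Int) ^ (m - k) * (Nat.choose m k : Int) * f (k + 1)
          + (-1 : Int) ^ (m - k) * (Nat.choose m (k + 1) : Int) * f (k + 1) := by
    intro k hk
    have h1 : m + 1 - (k + 1) = m - k := by omega
    rw [h1, Nat.choose_succ_succ]
    push_cast
    ring
  have hterm : ∀ k ∈ Finset.range (m + 1),
      (-1 : Int) ^ (m - k) * (Nat.choose m (k + 1) : Int) * f (k + 1)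
        = -((-1 : Int) ^ (m - (k + 1)) * (Nat.choose m (k + 1) : Int) * f (k + 1)) := by
    intro k hk
    have hk' : k < m + 1 := Finset.mem_range.mp hk
    by_cases hkm : k < m
    · have h2 : m - k = (m - (k + 1)) + 1 := by omega
      rw [h2, pow_succ]
      ring
    · have hkeq : k = m := by omega
      subst hkeq
      simp [Nat.choose_succ_self]
  have hb : ∑ k ∈ Finset.range (m + 1),
      (-1 : Int) ^ (m - k) * (Nat.choose m (k + 1) : Int) * f (k + 1)
      = -(∑ k ∈ Finset.range (m + 1),
          (-1 : Int) ^ (m - (k + 1)) * (Nat.choose m (k + 1) : Int) * f (k + 1)) := by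
    rw [Finset.sum_congr rfl hterm, Finset.sum_neg_distrib]
  have hdrop : ∑ k ∈ Finset.range (m + 1),
      (-1 : Int) ^ (m - (k + 1)) * (Nat.choose m (k + 1) : Int) * f (k + 1)
      = ∑ k ∈ Finset.range m,
          (-1 : Int) ^ (m - (k + 1)) * (Nat.choose m (k + 1) : Int) * f (k + 1) := by
    rw [Finset.sum_range_succ]
    simp [Nat.choose_succ_self]
  have hS0 := Finset.sum_range_succ'
    (fun k => (-1 : Int) ^ (m - k) * (Nat.choose m k : Int) * f k) m
  rw [hsplit, hR, Finset.sum_congr rfl hstep, Finset.sum_add_distrib, hb, hdrop, hS0]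
  simp only [Nat.sub_zero, Nat.choose_zero_right, Nat.cast_one, pow_succ]
  ring

-- A computes pvF
theorem pvF_diffs (s : List Int) (h : 2 ≤ s.length) : pvF (pvDiffsA s) = pvF s := by
  rw [pvDiffsA_eq]
  obtain ⟨m, hm⟩ : ∃ m, s.length = m + 2 := ⟨s.length - 2, by omega⟩
  unfold pvF
  rw [hm]
  have hlen : ((List.range (m + 2 - 1)).map (fun k => s.getD (k + 1) 0 - s.getD k 0)).length = m + 1 := by
    simp
  rw [hlen]
  have : ∀ k ∈ Finset.range (m + 1),
      (-1 : Int) ^ (m + 1 - 1 - k) * (Nat.choose (m + 1 - 1) k : Int) *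
          ((List.range (m + 2 - 1)).map (fun k => s.getD (k + 1) 0 - s.getD k 0)).getD k 0
        = (-1 : Int) ^ (m - k) * (Nat.choose m k : Int) * (s.getD (k + 1) 0 - s.getD k 0) := by
    intro k hk
    have hk' : k < m + 1 := Finset.mem_range.mp hk
    have hget : ((List.range (m + 2 - 1)).map (fun k => s.getD (k + 1) 0 - s.getD k 0)).getD k 0
        = s.getD (k + 1) 0 - s.getD k 0 := by
      rw [List.getD_eq_getElem _ _ (by simpa using hk')]
      simp
    rw [hget]
    norm_num
  rw [Finset.sum_congr rfl this, pv_key m (fun k => s.getD k 0)]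
  norm_num

theorem pvA_eq_F (n : Nat) : ∀ (s : List Int), s.length = n → 1 ≤ s.length → final_diff s = pvF s := by
  induction n using Nat.strong_induction_on with
  | _ n ih =>
    intro s hn h1
    rw [final_diff]
    by_cases hone : s.length = 1
    · obtain ⟨x, hx⟩ : ∃ x, s = [x] := by
        match s, hone with
        | [x], _ => exact ⟨x, rfl⟩
      subst hx
      simp [pvF, PySem.List.pyGetD_of_nonneg]
    · have h2 : 2 ≤ s.length := by omega
      have hlt : (pvDiffsA s).length < s.length := pvDiffsA_length_lt s hone (by omega)
      have hdl : (pvDiffsA s).length = s.length - 1 := by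
        rw [pvDiffsA_eq]; simp
      rw [if_neg hone, if_neg (by omega)]
      rw [ih (pvDiffsA s).length (by omega) (pvDiffsA s) rfl (by omega)]
      exact pvF_diffs s h2

-- B's loop invariant
theorem pvB_loop (n : Nat) (l : List Int) (j : Nat) (hj : j + l.length = n) (T sg : Int) :
    (l.foldl
      (fun (st : Int × Int × Int × Int) x =>
        (st.1 + st.2.1 * st.2.2.1 * x, -st.2.1,
         PySem.Int.floordiv (st.2.2.1 * ((n : Int) - 1 - st.2.2.2)) (st.2.2.2 + 1), st.2.2.2 + 1))
      (T, sg, (Nat.choose (n - 1) j : Int), (j : Int))).1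
    = T + ∑ k ∈ Finset.range l.length,
        sg * (-1 : Int) ^ k * (Nat.choose (n - 1) (j + k) : Int) * l.getD k 0 := by
  induction l generalizing j T sg with
  | nil => simp
  | cons x l ih =>
    have hjn : j + 1 ≤ n := by simp at hj; omega
    have hc : PySem.Int.floordiv ((Nat.choose (n - 1) j : Int) * ((n : Int) - 1 - (j : Int))) ((j : Int) + 1)
        = (Nat.choose (n - 1) (j + 1) : Int) := by
      have hsub : ((n : Int) - 1 - (j : Int)) = ((n - 1 - j : Nat) : Int) := by
        omega
      rw [hsub]
      have : (Nat.choose (n - 1) j : Int) * ((n - 1 - j : Nat) : Int)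
          = ((Nat.choose (n - 1) j * (n - 1 - j) : Nat) : Int) := by push_cast; ring
      rw [this]
      have : ((j : Int) + 1) = ((j + 1 : Nat) : Int) := by push_cast; ring
      rw [this, PySem.Int.floordiv_natCast]
      congr 1
      rw [← Nat.choose_succ_right_eq]
      exact Nat.mul_div_cancel _ (by omega)
    rw [List.foldl_cons]
    simp only []
    have := ih (j + 1) (by simp at hj ⊢; omega) (T + sg * (Nat.choose (n - 1) j : Int) * x) (-sg)
    push_cast at this ⊢
    rw [hc]
    rw [this]
    rw [List.length_cons, Finset.sum_range_succ']
    simp only [List.getD_cons_succ, List.getD_cons_zero]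
    have hterm : ∀ k, (-sg) * (-1 : Int) ^ k * (Nat.choose (n - 1) (j + 1 + k) : Int) * l.getD k 0
        = sg * (-1 : Int) ^ (k + 1) * (Nat.choose (n - 1) (j + (k + 1)) : Int) * l.getD k 0 := by
      intro k
      have : j + 1 + k = j + (k + 1) := by omega
      rw [this, pow_succ]
      ring
    rw [Finset.sum_congr rfl (fun k _ => hterm k)]
    simp [pow_zero]
    ring

theorem pv_neg_one_sq_pow (k : Nat) : (-1 : Int) ^ k * (-1 : Int) ^ k = 1 := by
  rw [← pow_add]
  exact Even.neg_one_pow ⟨k, by omega⟩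

theorem pvB_eq_F (s : List Int) (h : 1 ≤ s.length) : final_diff_alt s = pvF s := by
  unfold final_diff_alt
  simp only []
  have hsign : (if PySem.Int.mod ((s.length : Int) - 1) 2 ≠ 0 then (-1 : Int) else 1)
      = (-1 : Int) ^ (s.length - 1) := by
    have hmod : PySem.Int.mod ((s.length : Int) - 1) 2 = (((s.length - 1) % 2 : Nat) : Int) := by
      have hc : ((s.length : Int) - 1) = ((s.length - 1 : Nat) : Int) := by omega
      rw [hc]
      exact_mod_cast PySem.Int.mod_natCast (s.length - 1) 2
    rw [hmod]
    rcases Nat.even_or_odd (s.length - 1) with he | ho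
    · rw [Nat.even_iff] at he
      simp [he, Even.neg_one_pow (Nat.even_iff.mpr he)]
    · rw [Nat.odd_iff] at ho
      simp [ho, Odd.neg_one_pow (Nat.odd_iff.mpr ho)]
  rw [hsign]
  have hinv := pvB_loop s.length s 0 (by omega) 0 ((-1 : Int) ^ (s.length - 1))
  simp only [Nat.choose_zero_right, Nat.cast_one, Nat.cast_zero, zero_add] at hinv
  rw [hinv]
  unfold pvF
  apply Finset.sum_congr rfl
  intro k hk
  have hk' : k < s.length := Finset.mem_range.mp hk
  have hpow : (-1 : Int) ^ (s.length - 1) * (-1 : Int) ^ k = (-1 : Int) ^ (s.length - 1 - k) := by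
    have hsplit : s.length - 1 = (s.length - 1 - k) + k := by omega
    nth_rewrite 1 [hsplit]
    rw [pow_add, mul_assoc, pv_neg_one_sq_pow k, mul_one]
  rw [hpow]

-- ===== VERDICT (by name: the statement is the Claim_ definition above) =====
theorem final_diff_spec : Claim_equal_final_diff := by
  intro s _ hpre
  unfold Spec_final_diff
  have h1 : 1 ≤ s.length := by
    cases s with
    | nil => exact absurd rfl hpre
    | cons x l => simp
  rw [pvA_eq_F s.length s rfl h1, pvB_eq_F s h1]

def final_diff_raises : Claim_raises_final_diff := by
  unfold Claim_raises_final_diff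
  exact ⟨fun s _ hr hp => hp hr, by decide⟩
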